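-- pv_equiv track=rewrite | github.com/mariasebarespersona/rama-app | backend/chatbox.py | get_table_for_document_type
-- ===== SOURCE A (Python) =====
-- def get_table_for_document_type(doc_type: str) -> str:
--     mapping = {
--         "purchase_documents": ['contract', 'notary_deed', 'notary_registration', 'deposit', 'tax_ITP_IBA'],
--         "renovation_documents": ['geotechnical_study', 'land_plans', 'architect_plans', 'budget', 'architect_contract', 'surveyor_contract', 'building_license', 'contractor_contract', 'trade_contract', 'builder_payments'],
--         "sales_documents": ['sale_contract', 'payment_certification']
--     }
--     for tbl, types in mapping.items():
--         if doc_type in types: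
--             return tbl
--     return None
-- ===== SOURCE B (Python) =====
-- _MAPPING = {
--     "purchase_documents": ['contract', 'notary_deed', 'notary_registration', 'deposit', 'tax_ITP_IBA'],
--     "renovation_documents": ['geotechnical_study', 'land_plans', 'architect_plans', 'budget', 'architect_contract', 'surveyor_contract', 'building_license', 'contractor_contract', 'trade_contract', 'builder_payments'],
--     "sales_documents": ['sale_contract', 'payment_certification']
-- }
-- # flat reverse index: document type -> owning table, built once
-- _REVERSE = {t: tbl for tbl, types in _MAPPING.items() for t in types}
--
-- def get_table_for_document_type(doc_type: str) -> str:
--     return _REVERSE.get(doc_type)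
-- ===== Notes on version B (the rewrite author's own statement) =====
-- stated objective: idiomatic
-- what changed: Replaces the per-call loop over tables with an inner membership scan by a flat reverse dict (doc type -> table) built once, so the body is a single dict lookup.
import Mathlib
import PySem

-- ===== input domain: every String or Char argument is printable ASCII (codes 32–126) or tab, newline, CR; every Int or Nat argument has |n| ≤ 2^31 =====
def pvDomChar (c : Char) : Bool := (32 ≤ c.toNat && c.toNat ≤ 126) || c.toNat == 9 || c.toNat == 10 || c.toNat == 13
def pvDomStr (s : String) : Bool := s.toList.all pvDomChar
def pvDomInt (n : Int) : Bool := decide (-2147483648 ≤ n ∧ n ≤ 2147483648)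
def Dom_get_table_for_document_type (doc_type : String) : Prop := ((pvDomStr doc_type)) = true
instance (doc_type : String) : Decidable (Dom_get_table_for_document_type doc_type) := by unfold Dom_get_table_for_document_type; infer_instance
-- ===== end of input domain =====

-- B is the idiomatic form: a flat reverse dict (doc type -> table) built once, body is one lookup.

-- ===== PORT A =====
def pvMappingA : List (String × List String) :=
  [("purchase_documents", ["contract", "notary_deed", "notary_registration", "deposit", "tax_ITP_IBA"]),
   ("renovation_documents", ["geotechnical_study", "land_plans", "architect_plans", "budget", "architect_contract", "surveyor_contract", "building_license", "contractor_contract", "trade_contract", "builder_payments"]),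
   ("sales_documents", ["sale_contract", "payment_certification"])]

-- the 'for tbl, types in mapping.items(): if doc_type in types: return tbl' loop
def pvLoopA (items : List (String × List String)) (doc_type : String) : Option String :=
  match items with
  | [] => none
  | (tbl, types) :: rest => if types.contains doc_type then some tbl else pvLoopA rest doc_type

def get_table_for_document_type (doc_type : String) : Option String :=
  pvLoopA pvMappingA doc_type

-- ===== PORT B =====
-- the dict comprehension {t: tbl for tbl, types in _MAPPING.items() for t in types}
def pvReverse : PySem.Dict String String :=
  pvMappingA.foldl (fun d p => p.2.foldl (fun d t => d.insert t p.1) d) PySem.Dict.empty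

def get_table_for_document_type_alt (doc_type : String) : Option String :=
  pvReverse.get? doc_type

-- ===== PRECONDITION & SPEC =====
def Spec_get_table_for_document_type (doc_type : String) (out : Option String) : Prop := out = get_table_for_document_type_alt doc_type
instance (doc_type : String) (out : Option String) : Decidable (Spec_get_table_for_document_type doc_type out) := by unfold Spec_get_table_for_document_type; infer_instance

-- ===== CLAIM (what is proved, stated in full; the proofs are below) =====
def Claim_equal_get_table_for_document_type : Prop := ∀ (doc_type : String), Dom_get_table_for_document_type doc_type → Spec_get_table_for_document_type doc_type (get_table_for_document_type doc_type)

-- ===== LEMMAS AND PROOFS =====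
theorem pvReverse_items : pvReverse = PySem.Dict.mk
    [("contract", "purchase_documents"), ("notary_deed", "purchase_documents"),
     ("notary_registration", "purchase_documents"), ("deposit", "purchase_documents"),
     ("tax_ITP_IBA", "purchase_documents"),
     ("geotechnical_study", "renovation_documents"), ("land_plans", "renovation_documents"),
     ("architect_plans", "renovation_documents"), ("budget", "renovation_documents"),
     ("architect_contract", "renovation_documents"), ("surveyor_contract", "renovation_documents"),
     ("building_license", "renovation_documents"), ("contractor_contract", "renovation_documents"),
     ("trade_contract", "renovation_documents"), ("builder_payments", "renovation_documents"),
     ("sale_contract", "sales_documents"), ("payment_certification", "sales_documents")]  := by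
  rfl

-- ===== VERDICT (by name: the statement is the Claim_ definition above) =====
theorem get_table_for_document_type_spec : Claim_equal_get_table_for_document_type := by
  intro d _
  show get_table_for_document_type d = get_table_for_document_type_alt d
  by_cases h1 : d ∈ ["contract", "notary_deed", "notary_registration", "deposit", "tax_ITP_IBA"]
  · simp only [List.mem_cons, List.not_mem_nil, or_false] at h1
    rcases h1 with rfl | rfl | rfl | rfl | rfl <;> rfl
  by_cases h2 : d ∈ ["geotechnical_study", "land_plans", "architect_plans", "budget", "architect_contract", "surveyor_contract", "building_license", "contractor_contract", "trade_contract", "builder_payments"]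
  · simp only [List.mem_cons, List.not_mem_nil, or_false] at h2
    rcases h2 with rfl | rfl | rfl | rfl | rfl | rfl | rfl | rfl | rfl | rfl <;> rfl
  by_cases h3 : d ∈ ["sale_contract", "payment_certification"]
  · simp only [List.mem_cons, List.not_mem_nil, or_false] at h3
    rcases h3 with rfl | rfl <;> rfl
  · simp only [List.mem_cons, List.not_mem_nil, or_false, not_or] at h1 h2 h3
    obtain ⟨n1, n2, n3, n4, n5⟩ := h1
    obtain ⟨m1, m2, m3, m4, m5, m6, m7, m8, m9, m10⟩ := h2
    obtain ⟨k1, k2⟩ := h3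
    simp only [get_table_for_document_type, get_table_for_document_type_alt, pvReverse_items,
      pvMappingA, pvLoopA, PySem.Dict.get?_mk_cons, List.contains_eq_mem, List.mem_cons,
      List.not_mem_nil, or_false, decide_eq_true_eq]
    simp [beq_iff_eq, n1, n2, n3, n4, n5, m1, m2, m3, m4, m5, m6, m7, m8, m9, m10, k1, k2,
      Ne.symm n1, Ne.symm n2, Ne.symm n3, Ne.symm n4, Ne.symm n5, Ne.symm m1, Ne.symm m2,
      Ne.symm m3, Ne.symm m4, Ne.symm m5, Ne.symm m6, Ne.symm m7, Ne.symm m8, Ne.symm m9,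
      Ne.symm m10, Ne.symm k1, Ne.symm k2, PySem.Dict.get?]
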